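-- pv_equiv track=rewrite | github.com/matwej29/university | practikum_1-2/4/9_radix_sort.py | i_digit_sort
-- ===== SOURCE A (Python) =====
-- def i_digit_sort(i: int, a: list):
--     elems_by_digit = [[] for _ in range(10)]
--
--     for x in a:
--         elems_by_digit[x // (10 ** i) % 10].append(x)
--
--     result = []
--
--     for elem in elems_by_digit:
--         result.extend(elem)
--
--     return result
-- ===== SOURCE B (Python) =====
-- def i_digit_sort(i: int, a: list):
--     p = 10 ** i
--     return [x for d in range(10) for x in a if x // p % 10 == d]
-- ===== Notes on version B (the rewrite author's own statement) =====
-- stated objective: alternative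
-- what changed: Instead of one bucketing pass maintaining ten append-lists and then concatenating them, B makes ten selection passes: for each digit value 0..9 in order it filters the elements of a with that i-th digit, with no bucket state at all.
import Mathlib
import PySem

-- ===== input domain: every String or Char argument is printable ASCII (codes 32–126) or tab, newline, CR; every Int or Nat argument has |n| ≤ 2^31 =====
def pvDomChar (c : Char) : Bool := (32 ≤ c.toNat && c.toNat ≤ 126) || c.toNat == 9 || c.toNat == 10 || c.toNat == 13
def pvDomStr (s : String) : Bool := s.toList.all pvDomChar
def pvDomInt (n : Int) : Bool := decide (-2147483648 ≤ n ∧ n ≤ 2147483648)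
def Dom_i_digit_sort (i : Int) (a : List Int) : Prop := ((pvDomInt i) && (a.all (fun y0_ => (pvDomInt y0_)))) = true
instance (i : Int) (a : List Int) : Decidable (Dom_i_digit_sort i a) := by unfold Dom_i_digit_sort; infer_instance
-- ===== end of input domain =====

-- B replaces A's single bucketing pass (ten mutable buckets, then concatenation) by ten
-- stateless filter passes, one per digit value 0..9, concatenated in order (alternative
-- decomposition, same return value).

-- ===== PORT A =====
-- the i-th decimal digit of x: Python's x // (10 ** i) % 10 (exact for i ≥ 0)
def pvDigit (p x : Int) : Int := PySem.Int.mod (PySem.Int.floordiv x p) 10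

-- loop body of A's first loop: elems_by_digit[d].append(x), i.e. bucket d gets x appended
def pvStep (p : Int) (bs : List (List Int)) (x : Int) : List (List Int) :=
  bs.set (pvDigit p x).toNat ((bs.getD (pvDigit p x).toNat []) ++ [x])

def i_digit_sort (i : Int) (a : List Int) : List Int :=
  let p : Int := (10 : Int) ^ i.toNat   -- 10 ** i; exact for i ≥ 0 (Pre_); Python raises TypeError for i < 0, a ≠ []
  let elems_by_digit : List (List Int) := List.replicate 10 []
  let elems_by_digit := a.foldl (pvStep p) elems_by_digit
  elems_by_digit.foldl (fun result elem => result ++ elem) []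

-- ===== PORT B =====
def i_digit_sort_alt (i : Int) (a : List Int) : List Int :=
  let p : Int := (10 : Int) ^ i.toNat
  (List.range 10).flatMap (fun d => a.filter (fun x => pvDigit p x == (d : Int)))

-- ===== PRECONDITION & SPEC =====
-- Pre_ excludes exactly the inputs where Python A raises TypeError: i < 0 with a nonempty,
-- where 10 ** i is a float and the float bucket index is rejected (with a = [] A returns []).
def Pre_i_digit_sort (i : Int) (a : List Int) : Prop := 0 ≤ i ∨ a = []
instance (i : Int) (a : List Int) : Decidable (Pre_i_digit_sort i a) := by unfold Pre_i_digit_sort; infer_instance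
def pvWitness_i_digit_sort : Int × List Int := (1, [37, -5, 210, 8, 37])

def Spec_i_digit_sort (i : Int) (a : List Int) (out : List Int) : Prop := out = i_digit_sort_alt i a
instance (i : Int) (a : List Int) (out : List Int) : Decidable (Spec_i_digit_sort i a out) := by unfold Spec_i_digit_sort; infer_instance

-- ===== CLAIM (what is proved, stated in full; the proofs are below) =====
def Claim_equal_i_digit_sort : Prop := ∀ (i : Int) (a : List Int), Dom_i_digit_sort i a → Pre_i_digit_sort i a → Spec_i_digit_sort i a (i_digit_sort i a)

-- ===== LEMMAS AND PROOFS =====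

theorem pvDigit_bounds (p x : Int) : 0 ≤ pvDigit p x ∧ pvDigit p x < 10 := by
  unfold pvDigit PySem.Int.mod
  refine ⟨?_, Int.fmod_lt_of_pos _ (by norm_num)⟩
  rw [Int.fmod_eq_emod_of_nonneg _ (by norm_num : (0:Int) ≤ 10)]
  exact Int.emod_nonneg _ (by norm_num)

-- B's per-digit selection
def pvFilt (p : Int) (d : Nat) (a : List Int) : List Int :=
  a.filter (fun x => pvDigit p x == (d : Int))

-- bucket invariant: folding A's append step over a starting from any ten buckets appends
-- to each bucket exactly the elements of a whose digit selects it, in order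
theorem pv_key (p : Int) (a : List Int) :
    ∀ b0 b1 b2 b3 b4 b5 b6 b7 b8 b9 : List Int,
      a.foldl (pvStep p) [b0, b1, b2, b3, b4, b5, b6, b7, b8, b9]
      = [b0 ++ pvFilt p 0 a, b1 ++ pvFilt p 1 a, b2 ++ pvFilt p 2 a, b3 ++ pvFilt p 3 a,
         b4 ++ pvFilt p 4 a, b5 ++ pvFilt p 5 a, b6 ++ pvFilt p 6 a, b7 ++ pvFilt p 7 a,
         b8 ++ pvFilt p 8 a, b9 ++ pvFilt p 9 a] := by
  induction a with
  | nil => intro b0 b1 b2 b3 b4 b5 b6 b7 b8 b9; simp [pvFilt]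
  | cons x t ih =>
    intro b0 b1 b2 b3 b4 b5 b6 b7 b8 b9
    obtain ⟨h0, h1⟩ := pvDigit_bounds p x
    rw [List.foldl_cons]
    have hd : (pvDigit p x).toNat < 10 := by omega
    generalize hk : (pvDigit p x).toNat = k at hd
    have hdig : pvDigit p x = (k : Int) := by omega
    interval_cases k <;>
      · simp only [pvStep, hk, List.set, List.getD, List.getElem?_cons_zero,
          List.getElem?_cons_succ, Option.getD_some]
        rw [ih]
        simp [pvFilt, hdig]

-- ===== VERDICT (by name: the statement is the Claim_ definition above) =====
theorem i_digit_sort_spec : Claim_equal_i_digit_sort := by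
  intro i a _ _
  unfold Spec_i_digit_sort i_digit_sort i_digit_sort_alt
  simp only [List.replicate]
  rw [pv_key]
  simp [pvFilt, List.range_succ]
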